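-- pv_equiv track=rewrite | github.com/ncpy/algo | snack_shack.py | make_serve
-- ===== SOURCE A (Python) =====
-- make_sandwich   = 60 #sec
--
-- serve_sandwich  = 30
--
-- put_pototo_mw   = 1
--
-- heat_potato     = 150  #it can wait at microwave (my point)
--
-- top_potato      = 30
--
-- serve_potato    = 30
--
-- def make_serve(order_sandwich, order_potato, time):
--     k = order_potato
--
--     while order_sandwich > 0:
--         time += make_sandwich + serve_sandwich
--         order_sandwich -= 1
--
--     while order_potato > 0:
--         #1.durum, 2 iptal
--         if time < heat_potato*k:
--             time = put_pototo_mw + heat_potato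
--             time += top_potato + serve_potato
--         else:
--             time += put_pototo_mw + top_potato + serve_potato + heat_potato
--
--         # 2. durum, 1 iptal
--         # time += put_pototo_mw + top_potato + serve_potato + heat_potato
--         order_potato -= 1
--
--     return time
-- ===== SOURCE B (Python) =====
-- def make_serve(order_sandwich, order_potato, time):
--     t = time + 90 * max(order_sandwich, 0)
--     if order_potato <= 0:
--         return t
--     if t < 150 * order_potato:
--         return 211
--     return t + 211 * order_potato
-- ===== Notes on version B (the rewrite author's own statement) =====
-- stated objective: faster
-- what changed: Replaced both counting loops by closed-form arithmetic: sandwiches contribute 90 each, and the potato loop either pins time at 211 (when it starts below heat_potato*k) or adds 211 per potato, so B is a three-case O(1) formula.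
import Mathlib
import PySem

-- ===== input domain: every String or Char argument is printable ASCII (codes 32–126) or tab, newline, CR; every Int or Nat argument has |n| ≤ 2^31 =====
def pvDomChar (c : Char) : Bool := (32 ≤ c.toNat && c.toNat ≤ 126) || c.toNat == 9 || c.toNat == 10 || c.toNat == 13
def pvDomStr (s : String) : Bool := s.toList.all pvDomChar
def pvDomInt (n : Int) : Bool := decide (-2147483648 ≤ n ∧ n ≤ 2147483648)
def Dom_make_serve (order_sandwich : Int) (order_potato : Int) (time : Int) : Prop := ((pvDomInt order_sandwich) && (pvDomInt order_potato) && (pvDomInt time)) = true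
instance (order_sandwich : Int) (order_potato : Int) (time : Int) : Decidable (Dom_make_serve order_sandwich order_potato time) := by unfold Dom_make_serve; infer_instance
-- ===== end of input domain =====

-- B replaces A's two counting loops by a three-case closed-form formula (objective: faster, O(1)).

-- ===== PORT A =====
-- while order_sandwich > 0: time += make_sandwich + serve_sandwich; order_sandwich -= 1
def pvSandwichLoop (order_sandwich : Int) (time : Int) : Int :=
  if _h : order_sandwich > 0 then pvSandwichLoop (order_sandwich - 1) (time + (60 + 30))
  else time
termination_by order_sandwich.toNat
decreasing_by omega

-- while order_potato > 0: if time < heat_potato*k: time = 1+150; time += 30+30 else time += 1+30+30+150; order_potato -= 1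
def pvPotatoLoop (order_potato : Int) (time : Int) (k : Int) : Int :=
  if _h : order_potato > 0 then
    pvPotatoLoop (order_potato - 1)
      (if time < 150 * k then (1 + 150) + (30 + 30) else time + (1 + 30 + 30 + 150)) k
  else time
termination_by order_potato.toNat
decreasing_by omega

def make_serve (order_sandwich : Int) (order_potato : Int) (time : Int) : Int :=
  pvPotatoLoop order_potato (pvSandwichLoop order_sandwich time) order_potato

-- ===== PORT B =====
def make_serve_alt (order_sandwich : Int) (order_potato : Int) (time : Int) : Int :=
  let t := time + 90 * max order_sandwich 0
  if order_potato ≤ 0 then t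
  else if t < 150 * order_potato then 211
  else t + 211 * order_potato

-- ===== PRECONDITION & SPEC =====
def Spec_make_serve (order_sandwich : Int) (order_potato : Int) (time : Int) (out : Int) : Prop := out = make_serve_alt order_sandwich order_potato time
instance (order_sandwich : Int) (order_potato : Int) (time : Int) (out : Int) : Decidable (Spec_make_serve order_sandwich order_potato time out) := by unfold Spec_make_serve; infer_instance

-- ===== CLAIM (what is proved, stated in full; the proofs are below) =====
def Claim_equal_make_serve : Prop := ∀ (order_sandwich : Int) (order_potato : Int) (time : Int), Dom_make_serve order_sandwich order_potato time → Spec_make_serve order_sandwich order_potato time (make_serve order_sandwich order_potato time)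

-- ===== LEMMAS AND PROOFS =====

theorem pvSandwichLoop_eq (s t : Int) : pvSandwichLoop s t = t + 90 * max s 0 := by
  fun_induction pvSandwichLoop s t with
  | case1 s t h ih => rw [ih]; omega
  | case2 s t h => omega

theorem pvPotatoLoop_zero (p t k : Int) (hp : p ≤ 0) : pvPotatoLoop p t k = t := by
  rw [pvPotatoLoop, dif_neg (by omega)]

theorem pvPotatoLoop_succ (p t k : Int) (hp : 0 < p) :
    pvPotatoLoop p t k = pvPotatoLoop (p - 1) (if t < 150 * k then 211 else t + 211) k := by
  rw [pvPotatoLoop, dif_pos hp]; norm_num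

-- low case: once time is below 150*k and 211 < 150*k, the loop pins time at 211
theorem pvPotatoLoop_low (n : Nat) : ∀ t k : Int, 211 < 150 * k → t < 150 * k →
    pvPotatoLoop ((n : Int) + 1) t k = 211 := by
  induction n with
  | zero =>
    intro t k hk ht
    rw [pvPotatoLoop_succ _ _ _ (by omega), if_pos ht,
      show ((0 : Nat) : Int) + 1 - 1 = 0 by norm_num,
      pvPotatoLoop_zero _ _ _ le_rfl]
  | succ m ih =>
    intro t k hk ht
    rw [pvPotatoLoop_succ _ _ _ (by push_cast; omega), if_pos ht,
      show (((m + 1 : Nat)) : Int) + 1 - 1 = (m : Int) + 1 by push_cast; ring]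
    exact ih 211 k hk hk

-- high case: once time >= 150*k, every iteration adds 211
theorem pvPotatoLoop_high (n : Nat) : ∀ t k : Int, 150 * k ≤ t →
    pvPotatoLoop (n : Int) t k = t + 211 * (n : Int) := by
  induction n with
  | zero => intro t k h; rw [pvPotatoLoop_zero _ _ _ (by norm_num)]; norm_num
  | succ m ih =>
    intro t k h
    rw [pvPotatoLoop_succ _ _ _ (by push_cast; omega), if_neg (by omega),
      show (((m + 1 : Nat)) : Int) - 1 = (m : Int) by push_cast; ring,
      ih _ k (by omega)]
    push_cast; ring

-- ===== VERDICT (by name: the statement is the Claim_ definition above) =====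
theorem make_serve_spec : Claim_equal_make_serve := by
  intro s p t _
  unfold Spec_make_serve make_serve make_serve_alt
  rw [pvSandwichLoop_eq]
  set t1 := t + 90 * max s 0 with ht1
  by_cases hp : p <= 0
  · rw [pvPotatoLoop_zero _ _ _ hp, if_pos hp]
  · rw [if_neg hp]
    by_cases hlow : t1 < 150 * p
    · rw [if_pos hlow]
      by_cases hp1 : p = 1
      · subst hp1
        rw [pvPotatoLoop_succ _ _ _ (by norm_num), if_pos hlow,
          show (1 : Int) - 1 = 0 by norm_num, pvPotatoLoop_zero _ _ _ le_rfl]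
      · obtain ⟨n, hn⟩ : ∃ n : Nat, p = (n : Int) + 1 := ⟨(p - 1).toNat, by omega⟩
        rw [hn] at hlow ⊢
        exact pvPotatoLoop_low n t1 _ (by omega) hlow
    · rw [if_neg hlow]
      obtain ⟨n, hn⟩ : ∃ n : Nat, p = (n : Int) := ⟨p.toNat, by omega⟩
      rw [hn] at hlow ⊢
      exact pvPotatoLoop_high n t1 _ (by omega)
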